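-- pv_equiv track=rewrite | github.com/Barebore/Algorithms | Yandex_Praktikum/Algosiki/sprint1/task2.py | point_counter
-- ===== SOURCE A (Python) =====
-- def point_counter(max_count_choice, game_data):
--     """
--     Функция, вычисляющая максимальное количество
--     баллов, которое могут набрать участники.
--
--     >>> point_counter(3, [\
--         ['1', '2', '3', '1'],\
--         ['2', '.', '.', '2'],\
--         ['2', '.', '.', '2'],\
--         ['2', '.', '.', '2']\
--         ])
--     2
--     """
--
--     dct = dict()
--     for row in game_data:
--         for value in row:
--             if value in dct:
--                 dct[value] += 1
--             else:
--                 dct[value] = 1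
--     if '.' in dct:
--         del (dct['.'])
--
--     count = (1 for value in dct.values() if value <= max_count_choice*2)
--     return sum(count)
-- ===== SOURCE B (Python) =====
-- def point_counter(max_count_choice, game_data):
--     """Sort-and-scan reimplementation: flatten the grid, drop '.', sort,
--     then count runs whose length is within max_count_choice*2."""
--     limit = max_count_choice * 2
--     cells = sorted(v for row in game_data for v in row if v != '.')
--     answer = 0
--     run = 0
--     prev = None
--     for v in cells:
--         if run > 0 and v == prev:
--             run += 1
--         else:
--             if 0 < run <= limit:
--                 answer += 1
--             run = 1
--             prev = v
--     if 0 < run <= limit: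
--         answer += 1
--     return answer
-- ===== Notes on version B (the rewrite author's own statement) =====
-- stated objective: alternative
-- what changed: Replaces A's frequency dictionary by flattening the grid, dropping '.', sorting the cells, and counting runs of equal values whose length is within max_count_choice*2.
import Mathlib
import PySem

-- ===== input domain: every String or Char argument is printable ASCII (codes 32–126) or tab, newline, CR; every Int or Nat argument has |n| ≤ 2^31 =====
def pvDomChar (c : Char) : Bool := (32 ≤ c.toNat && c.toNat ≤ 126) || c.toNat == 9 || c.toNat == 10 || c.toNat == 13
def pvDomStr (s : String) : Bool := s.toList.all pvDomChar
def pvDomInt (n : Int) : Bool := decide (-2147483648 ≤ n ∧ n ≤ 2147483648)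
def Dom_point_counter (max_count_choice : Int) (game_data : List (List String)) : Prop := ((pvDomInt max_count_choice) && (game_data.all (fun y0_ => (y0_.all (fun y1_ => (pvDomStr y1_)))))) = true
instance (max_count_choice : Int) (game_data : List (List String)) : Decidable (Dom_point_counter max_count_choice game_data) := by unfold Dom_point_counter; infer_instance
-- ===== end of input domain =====

-- B replaces A's frequency dictionary by flatten-filter-sort and a run-length scan of the
-- sorted cell list (alternative algorithm; not claimed faster).

-- ===== PORT A =====
def point_counter (max_count_choice : Int) (game_data : List (List String)) : Int :=
  let dct := game_data.foldl (fun d row =>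
    row.foldl (fun d v =>
      if d.contains v then d.insert v (d.getD v 0 + 1) else d.insert v 1) d)
    PySem.Dict.empty
  let dct := if dct.contains "." then dct.erase "." else dct
  dct.values.foldl (fun acc v => if v ≤ max_count_choice * 2 then acc + 1 else acc) 0

-- ===== PORT B =====
-- one step of B's loop over the sorted cells; state = (answer, run, prev)
def pcStep (limit : Int) (st : Int × Int × Option String) (v : String) : Int × Int × Option String :=
  if st.2.1 > 0 ∧ some v = st.2.2 then (st.1, st.2.1 + 1, st.2.2)
  else ((if 0 < st.2.1 ∧ st.2.1 ≤ limit then st.1 + 1 else st.1), 1, some v)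

def point_counter_alt (max_count_choice : Int) (game_data : List (List String)) : Int :=
  let limit := max_count_choice * 2
  let cells := PySem.List.sorted
    (game_data.flatMap (fun row => row.filter (fun v => v != "."))) (fun v => v) false
  let st := cells.foldl (pcStep limit) (0, 0, none)
  st.1 + (if 0 < st.2.1 ∧ st.2.1 ≤ limit then 1 else 0)

-- ===== PRECONDITION & SPEC =====
def Spec_point_counter (max_count_choice : Int) (game_data : List (List String)) (out : Int) : Prop := out = point_counter_alt max_count_choice game_data
instance (max_count_choice : Int) (game_data : List (List String)) (out : Int) : Decidable (Spec_point_counter max_count_choice game_data out) := by unfold Spec_point_counter; infer_instance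

-- ===== CLAIM (what is proved, stated in full; the proofs are below) =====
def Claim_equal_point_counter : Prop := ∀ (max_count_choice : Int) (game_data : List (List String)), Dom_point_counter max_count_choice game_data → Spec_point_counter max_count_choice game_data (point_counter max_count_choice game_data)

-- ===== LEMMAS AND PROOFS =====

-- final flush of B's scan state
def pcFlush (limit : Int) (st : Int × Int × Option String) : Int :=
  st.1 + (if 0 < st.2.1 ∧ st.2.1 ≤ limit then 1 else 0)

-- the answer component is additive: starting the scan with answer a just adds a
lemma pcFlush_shift (k : Int) (l : List String) :
    ∀ (a r : Int) (p : Option String),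
      pcFlush k (l.foldl (pcStep k) (a, r, p)) = a + pcFlush k (l.foldl (pcStep k) (0, r, p)) := by
  induction l with
  | nil => intro a r p; simp [pcFlush]
  | cons v l ih =>
    intro a r p
    by_cases h : r > 0 ∧ some v = p
    · simp only [List.foldl_cons]
      have hs : ∀ b : Int, pcStep k (b, r, p) v = (b, r + 1, p) := fun b => by
        simp [pcStep, h]
      rw [hs a, hs 0, ih a (r + 1) p]
    · simp only [List.foldl_cons]
      by_cases hc : 0 < r ∧ r ≤ k
      · have hvp : ¬ some v = p := fun he => h ⟨hc.1, he⟩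
        have hs : ∀ b : Int, pcStep k (b, r, p) v = (b + 1, 1, some v) := fun b => by
          simp [pcStep, hvp, hc]
        rw [hs a, hs 0]
        simp only [zero_add]
        rw [ih (a + 1) 1 (some v), ih 1 1 (some v)]; ring
      · have hs : ∀ b : Int, pcStep k (b, r, p) v = (b, 1, some v) := fun b => by
          simp [pcStep, h, hc]
        rw [hs a, hs 0, ih a 1 (some v)]

-- a run of equal values is absorbed into the run counter
lemma pcStep_absorb (k : Int) (x : String) :
    ∀ (n : Nat) (a r : Int), 0 < r →
      (List.replicate n x).foldl (pcStep k) (a, r, some x) = (a, r + (n : Int), some x) := by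
  intro n
  induction n with
  | zero => intro a r _; simp
  | succ m ih =>
    intro a r hr
    have : List.replicate (m + 1) x = x :: List.replicate m x := rfl
    rw [this, List.foldl_cons]
    have hstep : pcStep k (a, r, some x) x = (a, r + 1, some x) := by
      simp [pcStep, hr]
    rw [hstep, ih a (r + 1) (by omega)]
    have : r + 1 + (m : Int) = r + ((m + 1 : Nat) : Int) := by push_cast; ring
    rw [this]

-- in a ≤-sorted list whose elements all dominate y, the y's form the prefix
lemma sorted_head_decomp (y : String) :
    ∀ (t : List String), t.Pairwise (· ≤ ·) → (∀ w ∈ t, y ≤ w) →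
      t = List.replicate (t.count y) y ++ t.dropWhile (fun z => z == y) ∧
      y ∉ t.dropWhile (fun z => z == y) ∧
      (t.dropWhile (fun z => z == y)).Pairwise (· ≤ ·) := by
  intro t
  induction t with
  | nil => intro _ _; simp
  | cons z t ih =>
    intro hp hy
    have hz := (List.pairwise_cons.mp hp).1
    have ht := (List.pairwise_cons.mp hp).2
    by_cases hzy : z = y
    · subst hzy
      have hyt : ∀ w ∈ t, z ≤ w := hz
      obtain ⟨h1, h2, h3⟩ := ih ht hyt
      refine ⟨?_, ?_, ?_⟩
      · have hc : (z :: t).count z = t.count z + 1 := by simp [List.count_cons]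
        rw [hc]
        have hd : (z :: t).dropWhile (fun w => w == z) = t.dropWhile (fun w => w == z) := by
          simp [List.dropWhile]
        rw [hd]
        have : List.replicate (t.count z + 1) z = z :: List.replicate (t.count z) z := rfl
        rw [this]
        simpa using h1
      · simpa [List.dropWhile] using h2
      · simpa [List.dropWhile] using h3
    · have hyz : y < z := lt_of_le_of_ne (hy z (by simp)) (fun h => hzy h.symm)
      have hnot : y ∉ z :: t := by
        intro hmem
        rcases List.mem_cons.mp hmem with h | h
        · exact hzy h.symm
        · exact absurd (lt_of_lt_of_le hyz (hz y h)) (lt_irrefl y)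
      have hc : (z :: t).count y = 0 := List.count_eq_zero.mpr hnot
      have hd : (z :: t).dropWhile (fun w => w == y) = z :: t := by
        simp [List.dropWhile_cons, hzy]
      exact ⟨by rw [hc, hd]; rfl, by rw [hd]; exact hnot, by rw [hd]; exact hp⟩

-- countP over any Nodup list equals countP over any other Nodup list with the same members
lemma countP_eq_of_mem_iff {l₁ l₂ : List String} (p : String → Bool)
    (h₁ : l₁.Nodup) (h₂ : l₂.Nodup) (h : ∀ a, a ∈ l₁ ↔ a ∈ l₂) :
    l₁.countP p = l₂.countP p :=
  ((List.perm_ext_iff_of_nodup h₁ h₂).mpr h).countP_eq p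

-- B's scan of a sorted list counts the distinct values whose multiplicity is ≤ k
lemma scan_sorted (k : Int) :
    ∀ (n : Nat) (ys : List String), ys.length ≤ n → ys.Pairwise (· ≤ ·) →
      pcFlush k (ys.foldl (pcStep k) (0, 0, none)) =
        ((PySem.Set.ofList ys).countP (fun v => decide ((ys.count v : Int) ≤ k)) : Int) := by
  intro n
  induction n with
  | zero =>
    intro ys hlen _
    have : ys = [] := List.eq_nil_of_length_eq_zero (Nat.le_zero.mp hlen)
    subst this; simp [pcFlush, PySem.Set.ofList]
  | succ n ih =>
    intro ys hlen hp
    cases ys with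
    | nil => simp [pcFlush, PySem.Set.ofList]
    | cons y t =>
      have hyt : ∀ w ∈ t, y ≤ w := (List.pairwise_cons.mp hp).1
      have htp : t.Pairwise (· ≤ ·) := (List.pairwise_cons.mp hp).2
      obtain ⟨hdec, hnmem, hzp⟩ := sorted_head_decomp y t htp hyt
      set zs := t.dropWhile (fun z => z == y) with hzs
      clear_value zs
      set c := t.count y with hcdef
      -- first step opens a run of y
      have hstep0 : pcStep k (0, 0, none) y = (0, 1, some y) := by
        simp [pcStep]
      -- length bound for the recursive call
      have hlz : zs.length ≤ n := by
        have h1 : t.length = c + zs.length := by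
          conv_lhs => rw [hdec]
          simp
        have : t.length ≤ n := by simpa using Nat.lt_succ_iff.mp (Nat.lt_of_lt_of_le (by simp) hlen)
        omega
      have hcount_y : (y :: t).count y = c + 1 := by
        have : y ∉ zs := hnmem
        simp [List.count_cons, hcdef]
      have hcount_zs : ∀ v ∈ zs, (y :: t).count v = zs.count v := by
        intro v hv
        have hvy : v ≠ y := fun h => hnmem (h ▸ hv)
        conv_lhs => rw [hdec]
        simp [List.count_cons, List.count_append, List.count_replicate, Ne.symm hvy]
      -- LHS: peel the run of y's, then compare with a fresh scan of zs
      have hlhs : pcFlush k ((y :: t).foldl (pcStep k) (0, 0, none)) =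
          (if (1 : Int) + (c : Int) ≤ k then 1 else 0) +
            pcFlush k (zs.foldl (pcStep k) (0, 0, none)) := by
        rw [List.foldl_cons, hstep0]
        conv_lhs => rw [hdec]
        rw [List.foldl_append, pcStep_absorb k y c 0 1 (by omega)]
        have hpos : (0 : Int) < 1 + (c : Int) := by positivity
        cases zs with
        | nil =>
          simp only [List.foldl_nil, pcFlush]
          simp [hpos]
        | cons z zs' =>
          have hzy : z ≠ y := fun h => hnmem (h ▸ List.mem_cons_self ..)
          have hstepz : pcStep k (0, 1 + (c : Int), some y) z =
              ((if (1 : Int) + (c : Int) ≤ k then 1 else 0), 1, some z) := by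
            simp [pcStep, hzy, hpos]
          have hstepf : pcStep k (0, 0, none) z = (0, 1, some z) := by
            simp [pcStep]
          rw [List.foldl_cons, hstepz, List.foldl_cons, hstepf,
            pcFlush_shift k zs' (if (1 : Int) + (c : Int) ≤ k then 1 else 0) 1 (some z)]
      -- RHS: split the distinct values into y and the distinct values of zs
      have hnody : y ∉ PySem.Set.ofList zs := fun h => hnmem ((PySem.Set.mem_ofList zs y).mp h)
      have hmemiff : ∀ a, a ∈ PySem.Set.ofList (y :: t) ↔ a ∈ y :: PySem.Set.ofList zs := by
        intro a
        simp only [PySem.Set.mem_ofList, List.mem_cons]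
        constructor
        · rintro (h | h)
          · exact Or.inl h
          · rw [hdec] at h
            rcases List.mem_append.mp h with h | h
            · exact Or.inl (List.eq_of_mem_replicate h)
            · exact Or.inr h
        · rintro (h | h)
          · exact Or.inl h
          · refine Or.inr ?_
            rw [hdec]; exact List.mem_append.mpr (Or.inr h)
      have hrhs : (PySem.Set.ofList (y :: t)).countP
            (fun v => decide (((y :: t).count v : Int) ≤ k)) =
          (y :: PySem.Set.ofList zs).countP (fun v => decide (((y :: t).count v : Int) ≤ k)) :=
        countP_eq_of_mem_iff _ (PySem.Set.nodup_ofList _)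
          (List.nodup_cons.mpr ⟨hnody, PySem.Set.nodup_ofList _⟩) hmemiff
      rw [hlhs, ih zs hlz hzp, hrhs, List.countP_cons]
      have hcong : (PySem.Set.ofList zs).countP (fun v => decide (((y :: t).count v : Int) ≤ k)) =
          (PySem.Set.ofList zs).countP (fun v => decide ((zs.count v : Int) ≤ k)) := by
        apply List.countP_congr
        intro v hv
        rw [hcount_zs v ((PySem.Set.mem_ofList zs v).mp hv)]
      rw [hcong, hcount_y]
      push_cast
      by_cases hk : (1 : Int) + (c : Int) ≤ k
      · have : ((c : Int) + 1 ≤ k) := by omega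
        simp [hk, this]; try ring
      · have : ¬ ((c : Int) + 1 ≤ k) := by omega
        simp [hk, this]; try ring

-- A's nested loop over rows is the counting loop over the flattened grid
lemma nested_foldl (f : PySem.Dict String Int → String → PySem.Dict String Int) :
    ∀ (gd : List (List String)) (d : PySem.Dict String Int),
      gd.foldl (fun d row => row.foldl f d) d = (gd.flatMap id).foldl f d := by
  intro gd
  induction gd with
  | nil => intro d; simp
  | cons row gd ih => intro d; simp [List.foldl_append, ih]

-- A's two insert branches are one counter update
lemma body_eq :
    (fun (d : PySem.Dict String Int) (v : String) =>
        if d.contains v then d.insert v (d.getD v 0 + 1) else d.insert v 1) =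
      (fun d v => d.insert v (d.getD v 0 + 1)) := by
  funext d v
  cases h : d.contains v with
  | true => simp
  | false =>
    rw [if_neg (by simp [h]), PySem.Dict.getD_of_not_contains d 0 h]
    norm_num

-- erasing '.' (A erases only when present) filters the items
lemma erase_items (C : PySem.Dict String Int) :
    (if C.contains "." then C.erase "." else C).items =
      C.items.filter (fun p => !(p.1 == ".")) := by
  by_cases h : C.contains "."
  · simp [h, PySem.Dict.erase]
  · rw [if_neg h]
    refine (List.filter_eq_self.mpr ?_).symm
    intro p hp
    have hk : p.1 ∈ C.keys := List.mem_map_of_mem hp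
    have : C.contains p.1 = true := by
      rw [PySem.Dict.contains_eq_decide_mem_keys]
      exact decide_eq_true hk
    by_contra hne
    have hp1 : p.1 = "." := by simpa using hne
    exact h (hp1 ▸ this)

-- summing 1 over the values within the limit is counting them
lemma foldl_if_le' {α : Type} (k : Int) (g : α → Int) (l : List α) :
    l.foldl (fun acc x => if g x ≤ k then acc + 1 else acc) 0 =
      (l.countP (fun x => decide (g x ≤ k)) : Int) := by
  have h : (fun (acc : Int) (x : α) => if g x ≤ k then acc + 1 else acc) =
      (fun acc x => if (fun x => decide (g x ≤ k)) x = true then acc + 1 else acc) := by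
    funext acc x; simp
  rw [h, PySem.List.foldl_count_if]; simp

-- A computes: the number of distinct non-'.' cells whose multiplicity is within the limit
lemma A_closed (m : Int) (gd : List (List String)) :
    point_counter m gd =
      (((PySem.Set.ofList (gd.flatMap id)).filter (fun v => !(v == "."))).countP
        (fun v => decide (((gd.flatMap id).count v : Int) ≤ m * 2)) : Int) := by
  unfold point_counter
  rw [body_eq, nested_foldl, PySem.Dict.foldl_insert_getD_add_one_eq_counter]
  set flatAll := gd.flatMap id with hflat
  simp only [PySem.Dict.values]
  rw [erase_items, PySem.Dict.items_counter, List.filter_map]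
  rw [List.foldl_map, foldl_if_le', List.countP_map]
  rfl

-- ===== VERDICT (by name: the statement is the Claim_ definition above) =====
theorem point_counter_spec : Claim_equal_point_counter := by
  intro m gd _
  show point_counter m gd = point_counter_alt m gd
  rw [A_closed]
  unfold point_counter_alt
  set flat := gd.flatMap (fun row => row.filter (fun v => v != ".")) with hflatdef
  set cells := PySem.List.sorted flat (fun v => v) false with hcells
  have hflatAll : flat = (gd.flatMap id).filter (fun v => v != ".") := by
    rw [List.filter_flatMap]; rfl
  have hsortp : cells.Pairwise (· ≤ ·) := by
    simpa using PySem.List.sorted_pairwise flat (fun v => v)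
  have hperm : cells.Perm flat := PySem.List.sorted_perm flat (fun v => v) false
  have hmain := scan_sorted (m * 2) cells.length cells (le_refl _) hsortp
  show _ = pcFlush (m * 2) (cells.foldl (pcStep (m * 2)) (0, 0, none))
  rw [hmain]
  -- counts in the sorted list are counts in flat
  have hcnt : ∀ v, cells.count v = flat.count v := fun v => hperm.count_eq v
  have hstep1 : (PySem.Set.ofList cells).countP
        (fun v => decide ((cells.count v : Int) ≤ m * 2)) =
      (PySem.Set.ofList flat).countP (fun v => decide ((flat.count v : Int) ≤ m * 2)) := by
    rw [List.countP_congr (fun x _ => by rw [hcnt x])]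
    exact countP_eq_of_mem_iff _ (PySem.Set.nodup_ofList _) (PySem.Set.nodup_ofList _)
      (fun a => by rw [PySem.Set.mem_ofList, PySem.Set.mem_ofList, hperm.mem_iff])
  rw [hstep1]
  -- the distinct values of the filtered list are the filtered distinct values
  have hstep2 : (PySem.Set.ofList flat).countP
        (fun v => decide ((flat.count v : Int) ≤ m * 2)) =
      ((PySem.Set.ofList (gd.flatMap id)).filter (fun v => !(v == "."))).countP
        (fun v => decide ((flat.count v : Int) ≤ m * 2)) := by
    apply countP_eq_of_mem_iff _ (PySem.Set.nodup_ofList _)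
      ((PySem.Set.nodup_ofList _).filter _)
    intro a
    rw [PySem.Set.mem_ofList, List.mem_filter, PySem.Set.mem_ofList, hflatAll, List.mem_filter]
    simp [bne]
  rw [hstep2]
  -- and their multiplicities agree since '.' is the only removed value
  have hstep3 : ∀ v ∈ (PySem.Set.ofList (gd.flatMap id)).filter (fun v => !(v == ".")),
      flat.count v = (gd.flatMap id).count v := by
    intro v hv
    have hne : (v != ".") = true := by
      have := (List.mem_filter.mp hv).2
      simpa using this
    rw [hflatAll]
    exact List.count_filter hne
  have hstep4 : ((PySem.Set.ofList (gd.flatMap id)).filter (fun v => !(v == "."))).countP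
        (fun v => decide ((flat.count v : Int) ≤ m * 2)) =
      ((PySem.Set.ofList (gd.flatMap id)).filter (fun v => !(v == "."))).countP
        (fun v => decide (((gd.flatMap id).count v : Int) ≤ m * 2)) :=
    List.countP_congr (fun x hx => by rw [hstep3 x hx])
  rw [hstep4]
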